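-- pv_equiv track=rewrite | github.com/LINE-qw/A10 | recognition/patch/tablePatch.py | DSB
-- ===== SOURCE A (Python) =====
-- def DSB(value):
--     for i in value:
--         if '0' <= i <= '9':
--             continue
--         if i == '.' or i == ',' or i == '，':
--             continue
--         return False
--     return True
-- ===== SOURCE B (Python) =====
-- def DSB(value):
--     return sum(value.count(c) for c in '0123456789.,，') == len(value)
-- ===== Notes on version B (the rewrite author's own statement) =====
-- stated objective: alternative
-- what changed: Instead of scanning the string once with per-character branches and an early return, B makes one counting pass per allowed character (str.count) and compares the total number of allowed-character occurrences with len(value); equality holds exactly when no other character occurs, since the 13 allowed characters are pairwise distinct.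
import Mathlib
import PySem

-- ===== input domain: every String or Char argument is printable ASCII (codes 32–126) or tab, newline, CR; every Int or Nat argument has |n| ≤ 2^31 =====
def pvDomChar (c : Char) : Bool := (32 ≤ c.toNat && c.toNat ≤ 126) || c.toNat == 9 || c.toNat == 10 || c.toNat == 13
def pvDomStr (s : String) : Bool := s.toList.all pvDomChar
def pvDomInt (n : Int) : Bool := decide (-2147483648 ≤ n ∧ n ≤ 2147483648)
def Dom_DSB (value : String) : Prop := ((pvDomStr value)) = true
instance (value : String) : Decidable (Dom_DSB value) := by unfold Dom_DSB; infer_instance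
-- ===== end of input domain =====

-- B: counts the occurrences of each of the 13 allowed characters (one str.count pass per character)
-- and compares the total with len(value), instead of A's single scan with branches and early return.
-- ===== PORT A =====
def DSB_go (cs : List Char) : Bool :=
  match cs with
  | [] => true
  | i :: rest =>
    if '0' ≤ i ∧ i ≤ '9' then DSB_go rest
    else if i = '.' ∨ i = ',' ∨ i = '，' then DSB_go rest
    else false

def DSB (value : String) : Bool := DSB_go value.toList

-- ===== PORT B =====
def DSB_alt (value : String) : Bool :=
  decide ((("0123456789.,，".toList).map
      (fun c => (PySem.Str.count value (String.ofList [c]) : Int))).sum = PySem.Str.len value)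

-- ===== PRECONDITION & SPEC =====
def Spec_DSB (value : String) (out : Bool) : Prop := out = DSB_alt value
instance (value : String) (out : Bool) : Decidable (Spec_DSB value out) := by unfold Spec_DSB; infer_instance

-- ===== CLAIM (what is proved, stated in full; the proofs are below) =====
def Claim_equal_DSB : Prop := ∀ (value : String), Dom_DSB value → Spec_DSB value (DSB value)

-- ===== LEMMAS AND PROOFS =====

-- counting a single-character substring is List.count
theorem count_go_single (c : Char) (s : List Char) :
    ∀ acc, PySem.Chars.count.go [c] s.length s acc = acc + s.count c := by
  induction s with
  | nil => intro acc; simp [PySem.Chars.count.go]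
  | cons h t ih =>
    intro acc
    simp only [List.length_cons, PySem.Chars.count.go]
    by_cases hc : h = c
    · subst hc
      simp [List.isPrefixOf, ih]
      omega
    · have : List.isPrefixOf [c] (h :: t) = false := by
        simp [List.isPrefixOf]; exact fun e => (hc e.symm).elim
      simp [this, ih, hc]

theorem count_single (s : String) (c : Char) :
    PySem.Str.count s (String.ofList [c]) = s.toList.count c := by
  rw [PySem.Str.count_eq, show (String.ofList [c]).toList = [c] by simp]
  simp only [PySem.Chars.count, List.isEmpty, reduceCtorEq, if_false]
  have h := count_go_single c s.toList 0; omega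

theorem countP_or_disj (p q : Char → Bool) (h : ∀ x, ¬(p x = true ∧ q x = true)) :
    ∀ cs : List Char, cs.countP (fun x => p x || q x) = cs.countP p + cs.countP q := by
  intro cs
  induction cs with
  | nil => simp
  | cons a t ih =>
    simp only [List.countP_cons, ih]
    by_cases hp : p a = true <;> by_cases hq : q a = true
    · exact absurd ⟨hp, hq⟩ (h a)
    · simp [hp, hq]; omega
    · simp [hp, hq]; omega
    · simp [hp, hq]

-- summing counts over a duplicate-free key list is countP of membership
theorem sum_counts_eq_countP (l : List Char) (hl : l.Nodup) (cs : List Char) :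
    (l.map (fun c => cs.count c)).sum = cs.countP (fun x => decide (x ∈ l)) := by
  induction l with
  | nil => simp
  | cons a l' ih =>
    have hnd := List.nodup_cons.mp hl
    have hdisj : ∀ x : Char, ¬((x == a) = true ∧ decide (x ∈ l') = true) := by
      intro x ⟨h1, h2⟩
      exact hnd.1 ((beq_iff_eq.mp h1) ▸ (decide_eq_true_iff.mp h2))
    have hpred : (fun x : Char => decide (x ∈ a :: l')) = (fun x => (x == a) || decide (x ∈ l')) := by
      funext x
      by_cases hx : x = a <;> by_cases hx2 : x ∈ l' <;> simp [hx, hx2]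
    simp only [List.map_cons, List.sum_cons, ih hnd.2, hpred, countP_or_disj _ _ hdisj]
    rw [List.count]

theorem DSB_go_eq_all (cs : List Char) :
    DSB_go cs = cs.all (fun i => decide ('0' ≤ i ∧ i ≤ '9') || decide (i = '.' ∨ i = ',' ∨ i = '，')) := by
  induction cs with
  | nil => rfl
  | cons i rest ih =>
    simp only [DSB_go, List.all_cons, ih]
    by_cases h1 : '0' ≤ i ∧ i ≤ '9' <;> by_cases h2 : i = '.' ∨ i = ',' ∨ i = '，' <;> simp [h1, h2]

theorem digit_mem (i : Char) (h1 : '0' ≤ i) (h2 : i ≤ '9') :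
    i ∈ ['0','1','2','3','4','5','6','7','8','9'] := by
  have hl : 48 ≤ i.toNat := h1
  have hr : i.toNat ≤ 57 := h2
  have he : i = Char.ofNat i.toNat := (Char.ofNat_toNat i).symm
  interval_cases h : i.toNat <;> (rw [he]; decide)

theorem mem_allowed_iff (i : Char) :
    i ∈ "0123456789.,，".toList ↔ ('0' ≤ i ∧ i ≤ '9') ∨ (i = '.' ∨ i = ',' ∨ i = '，') := by
  have hlist : "0123456789.,，".toList = ['0','1','2','3','4','5','6','7','8','9','.',',','，'] := by decide
  rw [hlist]
  constructor
  · intro h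
    simp only [List.mem_cons, List.not_mem_nil, or_false] at h
    rcases h with rfl|rfl|rfl|rfl|rfl|rfl|rfl|rfl|rfl|rfl|rfl|rfl|rfl <;> decide
  · rintro (⟨h1, h2⟩ | h)
    · have hm := digit_mem i h1 h2
      fin_cases hm <;> decide
    · rcases h with rfl | rfl | rfl <;> decide

-- ===== VERDICT (by name: the statement is the Claim_ definition above) =====
theorem DSB_spec : Claim_equal_DSB := by
  intro value _
  unfold Spec_DSB DSB_alt
  rw [DSB, DSB_go_eq_all]
  have hnd : ("0123456789.,，".toList).Nodup := by decide
  have hsum : (("0123456789.,，".toList).map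
      (fun c => (PySem.Str.count value (String.ofList [c]) : Int))).sum
      = ((value.toList.countP (fun x => decide (x ∈ "0123456789.,，".toList)) : Nat) : Int) := by
    have h1 : ("0123456789.,，".toList).map
        (fun c => (PySem.Str.count value (String.ofList [c]) : Int))
        = (("0123456789.,，".toList).map (fun c => value.toList.count c)).map
            (fun n : Nat => (n : Int)) := by
      rw [List.map_map]
      apply List.map_congr_left; intro c _
      simp only [Function.comp]
      rw [count_single]
    rw [h1, ← Nat.cast_list_sum, sum_counts_eq_countP _ hnd value.toList]
  rw [hsum, PySem.Str.len_eq]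
  have hiff : (((value.toList.countP (fun x => decide (x ∈ "0123456789.,，".toList)) : Nat) : Int)
        = (value.toList.length : Int))
      ↔ (∀ x ∈ value.toList,
          (decide ('0' ≤ x ∧ x ≤ '9') || decide (x = '.' ∨ x = ',' ∨ x = '，')) = true) := by
    rw [Nat.cast_inj, List.countP_eq_length]
    constructor
    · intro h x hx
      have := decide_eq_true_iff.mp (h x hx)
      rw [mem_allowed_iff] at this
      rcases this with h | h <;> simp [h]
    · intro h x hx
      have := h x hx
      simp only [Bool.or_eq_true, decide_eq_true_iff] at this
      exact decide_eq_true_iff.mpr ((mem_allowed_iff x).mpr this)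
  rcases hb : decide
      ((((value.toList.countP (fun x => decide (x ∈ "0123456789.,，".toList)) : Nat) : Int))
        = (value.toList.length : Int)) with _ | _
  · rw [decide_eq_false_iff_not] at hb
    rw [Bool.eq_false_iff]
    intro hall
    exact hb (hiff.mpr (List.all_eq_true.mp hall))
  · rw [decide_eq_true_iff] at hb
    exact List.all_eq_true.mpr (hiff.mp hb)
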